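-- pv_equiv track=rewrite | github.com/jesse-ai/jesse | jesse/indicators/stiffness.py | _count_price_exceed_series
-- ===== SOURCE A (Python) =====
-- def _count_price_exceed_series(close_prices, art_series, length):
--     ex_counts = []
--
--     for i in range(len(close_prices)):
--         if i < length:
--             ex_counts.append(0)
--             continue
--         count = 0
--
--         for j in range(i - length + 1, i + 1):
--             if close_prices[j] > art_series[j]:
--                 count += 1
--
--         ex_counts.append(count)
--
--     return ex_counts
-- ===== SOURCE B (Python) =====
-- def _count_price_exceed_series(close_prices, art_series, length):
--     n = len(close_prices)
--     prefix = [0]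
--     for c, a in zip(close_prices, art_series):
--         prefix.append(prefix[-1] + (1 if c > a else 0))
--     return [0 if i < length or length < 1 else prefix[i + 1] - prefix[i - length + 1]
--             for i in range(n)]
-- ===== Notes on version B (the rewrite author's own statement) =====
-- stated objective: faster
-- what changed: replaces the per-index inner window scan with a prefix-sum array built in one pass, so each output element is a difference of two prefix sums
import Mathlib
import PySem

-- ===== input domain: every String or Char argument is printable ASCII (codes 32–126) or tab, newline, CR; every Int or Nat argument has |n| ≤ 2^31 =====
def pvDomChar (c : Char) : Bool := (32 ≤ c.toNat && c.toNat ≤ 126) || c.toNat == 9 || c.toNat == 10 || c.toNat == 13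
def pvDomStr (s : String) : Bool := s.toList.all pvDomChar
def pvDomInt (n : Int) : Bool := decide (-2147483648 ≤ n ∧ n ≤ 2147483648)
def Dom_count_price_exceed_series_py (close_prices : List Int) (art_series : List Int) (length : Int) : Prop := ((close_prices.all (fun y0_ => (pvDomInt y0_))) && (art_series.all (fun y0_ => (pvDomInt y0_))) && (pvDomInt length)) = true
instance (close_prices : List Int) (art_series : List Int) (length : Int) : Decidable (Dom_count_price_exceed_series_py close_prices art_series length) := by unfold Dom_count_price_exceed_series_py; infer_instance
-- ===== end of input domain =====

-- B replaces A's O(n*length) per-index window rescan with a one-pass prefix-sum array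
-- (each output element is a difference of two prefix sums); objective: faster.

-- ===== PORT A =====
def count_price_exceed_series_py (close_prices : List Int) (art_series : List Int) (length : Int) : List Int :=
  (PySem.List.pyRange 0 (close_prices.length : Int) 1).foldl
    (fun ex_counts i =>
      if i < length then ex_counts ++ [0]
      else ex_counts ++ [(PySem.List.pyRange (i - length + 1) (i + 1) 1).foldl
        (fun count j =>
          if PySem.List.pyGetD close_prices j 0 > PySem.List.pyGetD art_series j 0
          then count + 1 else count) 0]) []

-- ===== PORT B =====
def count_price_exceed_series_py_alt (close_prices : List Int) (art_series : List Int) (length : Int) : List Int :=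
  let pref := (close_prices.zip art_series).foldl
    (fun p ca => p ++ [PySem.List.pyGetD p (-1) 0 + (if ca.1 > ca.2 then (1:Int) else 0)]) [0]
  (PySem.List.pyRange 0 (close_prices.length : Int) 1).map (fun i =>
    if i < length ∨ length < 1 then 0
    else PySem.List.pyGetD pref (i + 1) 0 - PySem.List.pyGetD pref (i - length + 1) 0)

-- ===== PRECONDITION & SPEC =====
-- Pre_ excludes exactly the inputs where A raises IndexError: art_series shorter than
-- close_prices while some window (1 ≤ length < len(close_prices)) is actually scanned.
def Pre_count_price_exceed_series_py (close_prices : List Int) (art_series : List Int) (length : Int) : Prop :=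
  (1 ≤ length ∧ length < (close_prices.length : Int)) → close_prices.length ≤ art_series.length
instance (close_prices : List Int) (art_series : List Int) (length : Int) : Decidable (Pre_count_price_exceed_series_py close_prices art_series length) := by unfold Pre_count_price_exceed_series_py; infer_instance

def pvWitness_count_price_exceed_series_py : List Int × List Int × Int := ([3, 1, 4], [2, 2, 2], 2)

def Spec_count_price_exceed_series_py (close_prices : List Int) (art_series : List Int) (length : Int) (out : List Int) : Prop := out = count_price_exceed_series_py_alt close_prices art_series length
instance (close_prices : List Int) (art_series : List Int) (length : Int) (out : List Int) : Decidable (Spec_count_price_exceed_series_py close_prices art_series length out) := by unfold Spec_count_price_exceed_series_py; infer_instance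

-- ===== CLAIM (what is proved, stated in full; the proofs are below) =====
def Claim_equal_count_price_exceed_series_py : Prop := ∀ (close_prices : List Int) (art_series : List Int) (length : Int), Dom_count_price_exceed_series_py close_prices art_series length → Pre_count_price_exceed_series_py close_prices art_series length → Spec_count_price_exceed_series_py close_prices art_series length (count_price_exceed_series_py close_prices art_series length)

-- ===== LEMMAS AND PROOFS =====

-- flag of one zipped pair
def pvFlag (ca : Int × Int) : Int := if ca.1 > ca.2 then 1 else 0

-- prefix count over the first k zipped pairs
def pvF (l : List (Int × Int)) (k : Nat) : Int := ((l.take k).map pvFlag).sum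

-- running-sum scan (B's prefix list, mathematically)
def pvScan : Int → List (Int × Int) → List Int
  | a, [] => [a]
  | a, x :: l => a :: pvScan (a + pvFlag x) l

-- B's append-loop is a scan of running sums
lemma pvFold_eq_scanl (l : List (Int × Int)) :
    ∀ (acc : List Int) (a : Int),
      l.foldl (fun p ca => p ++ [PySem.List.pyGetD p (-1) 0 + (if ca.1 > ca.2 then (1:Int) else 0)]) (acc ++ [a])
        = acc ++ pvScan a l := by
  induction l with
  | nil => intro acc a; simp [pvScan]
  | cons x l ih =>
      intro acc a
      simp only [List.foldl_cons, PySem.List.pyGetD_neg_one_append_singleton, pvScan]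
      have : (acc ++ [a]) ++ [a + (if x.1 > x.2 then (1:Int) else 0)]
           = (acc ++ [a]) ++ [a + pvFlag x] := by simp [pvFlag]
      rw [this, ih (acc ++ [a]) (a + pvFlag x)]
      simp

lemma pvScanl_getD (l : List (Int × Int)) :
    ∀ (a : Int) (k : Nat), k ≤ l.length →
      (pvScan a l).getD k 0 = a + pvF l k := by
  induction l with
  | nil =>
      intro a k hk
      obtain rfl : k = 0 := by simpa using hk
      simp [pvScan, pvF]
  | cons x l ih =>
      intro a k hk
      cases k with
      | zero => simp [pvScan, pvF]
      | succ k =>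
          simp only [pvScan, List.getD_cons_succ]
          rw [ih (a + pvFlag x) k (by simpa using hk)]
          simp [pvF, add_assoc]

-- A's inner window count as a countP
lemma pvWindow_countP (close art : List Int) (a b : Int) :
    (PySem.List.pyRange a b 1).foldl
        (fun count j =>
          if PySem.List.pyGetD close j 0 > PySem.List.pyGetD art j 0
          then count + 1 else count) 0
      = ((PySem.List.pyRange a b 1).countP
          (fun j => decide (PySem.List.pyGetD close j 0 > PySem.List.pyGetD art j 0)) : Int) := by
  rw [PySem.List.foldl_ite_add_one]
  simp

-- the window count equals a difference of prefix counts (Nat-indexed form)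
lemma pvCount_range (close art : List Int) (hart : close.length ≤ art.length) :
    ∀ (d a : Nat), a + d ≤ close.length →
      (((PySem.List.pyRange (a : Int) ((a + d : Nat) : Int) 1).countP
          (fun j => decide (PySem.List.pyGetD close j 0 > PySem.List.pyGetD art j 0))) : Int)
        = pvF (close.zip art) (a + d) - pvF (close.zip art) a := by
  intro d
  induction d with
  | zero => intro a ha; simp [PySem.List.pyRange_one_eq_nil]
  | succ d ih =>
      intro a ha
      have h1 : ((a + (d + 1) : Nat) : Int) = ((a + d : Nat) : Int) + 1 := by push_cast; ring
      have h2 : (a : Int) ≤ ((a + d : Nat) : Int) := by push_cast; omega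
      rw [h1, PySem.List.pyRange_one_succ_right h2]
      have hlt : a + d < close.length := by omega
      have hlt' : a + d < art.length := by omega
      have hzl : a + d < (close.zip art).length := by simp [List.length_zip]; omega
      have hflag : pvF (close.zip art) (a + d + 1) = pvF (close.zip art) (a + d) + pvFlag ((close.zip art)[a + d]) := by
        unfold pvF
        rw [List.take_add_one]
        simp [List.getElem?_eq_getElem hzl]
      have hzget : (close.zip art)[a + d]'hzl = (close[a + d]'hlt, art[a + d]'hlt') := by
        simp
      have hsingle : (([((a + d : Nat) : Int)].countP
          (fun j => decide (PySem.List.pyGetD close j 0 > PySem.List.pyGetD art j 0))) : Int)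
          = pvFlag ((close.zip art)[a + d]) := by
        simp only [List.countP_singleton, hzget, pvFlag]
        rw [PySem.List.pyGetD_natCast, PySem.List.pyGetD_natCast]
        rw [List.getD_eq_getElem _ _ hlt, List.getD_eq_getElem _ _ hlt']
        split_ifs <;> simp_all
      rw [List.countP_append, Nat.cast_add]
      rw [ih a (by omega), hsingle]
      rw [show a + (d + 1) = a + d + 1 from rfl, hflag]
      ring

-- ===== VERDICT (by name: the statement is the Claim_ definition above) =====
theorem count_price_exceed_series_py_spec : Claim_equal_count_price_exceed_series_py := by
  intro close art length _ hpre
  unfold Spec_count_price_exceed_series_py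
  simp only [count_price_exceed_series_py, count_price_exceed_series_py_alt]
  have hfun : (fun (ex_counts : List Int) (i : Int) =>
      if i < length then ex_counts ++ [0]
      else ex_counts ++ [(PySem.List.pyRange (i - length + 1) (i + 1) 1).foldl
        (fun count j =>
          if PySem.List.pyGetD close j 0 > PySem.List.pyGetD art j 0
          then count + 1 else count) 0])
    = (fun (ex_counts : List Int) (i : Int) => ex_counts ++
        [if i < length then 0
         else (PySem.List.pyRange (i - length + 1) (i + 1) 1).foldl
          (fun count j =>
            if PySem.List.pyGetD close j 0 > PySem.List.pyGetD art j 0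
            then count + 1 else count) 0]) := by
    funext ex i; split_ifs <;> rfl
  rw [hfun, PySem.List.foldl_append_singleton_eq_map]
  have hprefix : (close.zip art).foldl
      (fun p ca => p ++ [PySem.List.pyGetD p (-1) 0 + (if ca.1 > ca.2 then (1:Int) else 0)]) [0]
      = pvScan 0 (close.zip art) := by
    simpa using pvFold_eq_scanl (close.zip art) [] 0
  simp only [List.nil_append, hprefix]
  apply List.map_congr_left
  intro i hi
  rw [PySem.List.mem_pyRange_one] at hi
  by_cases hil : i < length
  · simp [hil]
  · simp only [if_neg hil]
    by_cases hl1 : length < 1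
    · have hnil : PySem.List.pyRange (i - length + 1) (i + 1) 1 = [] :=
        PySem.List.pyRange_one_eq_nil (by omega)
      simp [hnil, hl1]
    · -- 1 ≤ length ≤ i < close.length
      have hlen : close.length ≤ art.length := hpre ⟨by omega, by omega⟩
      simp only [if_neg (by omega : ¬ (i < length ∨ length < 1))]
      -- write the Int indices as Nat casts
      obtain ⟨k, rfl⟩ : ∃ k : Nat, i = (k : Int) := ⟨i.toNat, by omega⟩
      obtain ⟨L, rfl⟩ : ∃ L : Nat, length = (L : Int) := ⟨length.toNat, by omega⟩
      have hkL : L ≤ k := by exact_mod_cast not_lt.mp hil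
      have hkn : k < close.length := by exact_mod_cast hi.2
      -- A's window count via the prefix counts
      have ha : ((k : Int) - L + 1) = ((k - L + 1 : Nat) : Int) := by push_cast; omega
      have hb : ((k : Int) + 1) = (((k - L + 1) + L : Nat) : Int) := by push_cast; omega
      rw [pvWindow_countP, ha, hb,
        pvCount_range close art hlen L (k - L + 1) (by omega)]
      -- B's two prefix lookups
      have hsc : ∀ (m : Nat), m ≤ close.length →
          PySem.List.pyGetD (pvScan 0 (close.zip art)) ((m : Nat) : Int) 0
            = pvF (close.zip art) m := by
        intro m hm
        have hzlen : m ≤ (close.zip art).length := by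
          simp only [List.length_zip]; omega
        rw [PySem.List.pyGetD_natCast, pvScanl_getD _ _ _ hzlen]
        ring
      rw [hsc (k - L + 1 + L) (by omega), hsc (k - L + 1) (by omega)]
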